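-- pv_equiv track=rewrite | github.com/danielreidxd/cagemind | backend/services/odds.py | match_fighter_names
-- ===== SOURCE A (Python) =====
-- def normalize_name(name: str) -> str:
--     """Normaliza nombre para matching entre APIs."""
--     return name.strip().lower().replace(".", "").replace("'", "")
--
-- def match_fighter_names(api_name: str, db_fighters: dict) -> str | None:
--     """Intenta matchear un nombre de la API de odds con un nombre de la BD."""
--     norm = normalize_name(api_name)
--     for db_name in db_fighters:
--         if normalize_name(db_name) == norm:
--             return db_name
--     # Partial match: apellido
--     parts = norm.split()
--     if len(parts) >= 2:
--         last = parts[-1]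
--         first = parts[0]
--         for db_name in db_fighters:
--             db_norm = normalize_name(db_name)
--             db_parts = db_norm.split()
--             if len(db_parts) >= 2 and db_parts[-1] == last and db_parts[0] == first:
--                 return db_name
--     return None
-- ===== SOURCE B (Python) =====
-- def normalize_name(name: str) -> str:
--     """Normaliza nombre para matching entre APIs."""
--     return name.strip().lower().replace(".", "").replace("'", "")
--
-- def match_fighter_names(api_name: str, db_fighters: dict) -> str | None:
--     """Single pass: exact match returns immediately; first partial match is remembered."""
--     norm = normalize_name(api_name)
--     parts = norm.split()
--     need = len(parts) >= 2
--     cand = None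
--     for db_name in db_fighters:
--         db_norm = normalize_name(db_name)
--         if db_norm == norm:
--             return db_name
--         if cand is None and need:
--             dp = db_norm.split()
--             if len(dp) >= 2 and dp[-1] == parts[-1] and dp[0] == parts[0]:
--                 cand = db_name
--     return cand
-- ===== Notes on version B (the rewrite author's own statement) =====
-- stated objective: simpler
-- what changed: Replaced A's two sequential scans of db_fighters (exact pass, then partial pass) with one pass that returns an exact match immediately and remembers the first partial candidate in an accumulator.
import Mathlib
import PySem

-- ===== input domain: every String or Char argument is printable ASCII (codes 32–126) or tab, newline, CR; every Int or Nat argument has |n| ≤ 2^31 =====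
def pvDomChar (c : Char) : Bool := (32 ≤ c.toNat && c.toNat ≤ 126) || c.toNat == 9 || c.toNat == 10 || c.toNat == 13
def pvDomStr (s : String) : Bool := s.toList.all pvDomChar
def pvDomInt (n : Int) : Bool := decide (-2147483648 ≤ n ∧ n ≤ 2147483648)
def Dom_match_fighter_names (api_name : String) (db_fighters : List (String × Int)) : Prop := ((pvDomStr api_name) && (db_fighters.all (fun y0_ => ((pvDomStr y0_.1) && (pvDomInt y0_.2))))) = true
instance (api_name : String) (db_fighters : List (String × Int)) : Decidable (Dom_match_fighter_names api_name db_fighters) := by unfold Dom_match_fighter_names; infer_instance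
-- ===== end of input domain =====

-- ===== PORT A =====
-- B changes: one pass with a remembered partial candidate instead of A's two sequential scans (simpler).
def pvNorm (s : String) : String :=
  PySem.Str.replace (PySem.Str.replace (PySem.Str.lower (PySem.Str.strip s)) "." "") "'" ""

def pvScanExact (norm : String) : List (String × Int) → Option String
  | [] => none
  | (db, _) :: rest => if pvNorm db == norm then some db else pvScanExact norm rest

def pvPartialHit (first last : String) (dbNorm : String) : Bool :=
  let dp := PySem.Str.split₀ dbNorm
  decide (2 ≤ dp.length) && (dp.getLastD "" == last) && (dp.getD 0 "" == first)

def pvScanPartial (first last : String) : List (String × Int) → Option String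
  | [] => none
  | (db, _) :: rest =>
    if pvPartialHit first last (pvNorm db) then some db else pvScanPartial first last rest

def match_fighter_names (api_name : String) (db_fighters : List (String × Int)) : Option String :=
  let norm := pvNorm api_name
  match pvScanExact norm db_fighters with
  | some r => some r
  | none =>
    let parts := PySem.Str.split₀ norm
    if 2 ≤ parts.length then
      pvScanPartial (parts.getD 0 "") (parts.getLastD "") db_fighters
    else none

-- ===== PORT B =====
def pvLoopB (norm first last : String) (need : Bool) (cand : Option String) :
    List (String × Int) → Option String
  | [] => cand
  | (db, _) :: rest =>
    let dbNorm := pvNorm db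
    if dbNorm == norm then some db
    else
      let cand' := if cand.isNone && need && pvPartialHit first last dbNorm then some db else cand
      pvLoopB norm first last need cand' rest

def match_fighter_names_alt (api_name : String) (db_fighters : List (String × Int)) : Option String :=
  let norm := pvNorm api_name
  let parts := PySem.Str.split₀ norm
  pvLoopB norm (parts.getD 0 "") (parts.getLastD "") (decide (2 ≤ parts.length)) none db_fighters

-- ===== PRECONDITION & SPEC =====
def Spec_match_fighter_names (api_name : String) (db_fighters : List (String × Int)) (out : Option String) : Prop := out = match_fighter_names_alt api_name db_fighters
instance (api_name : String) (db_fighters : List (String × Int)) (out : Option String) : Decidable (Spec_match_fighter_names api_name db_fighters out) := by unfold Spec_match_fighter_names; infer_instance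

-- ===== CLAIM (what is proved, stated in full; the proofs are below) =====
def Claim_equal_match_fighter_names : Prop := ∀ (api_name : String) (db_fighters : List (String × Int)), Dom_match_fighter_names api_name db_fighters → Spec_match_fighter_names api_name db_fighters (match_fighter_names api_name db_fighters)

-- ===== LEMMAS AND PROOFS =====
theorem pvLoopB_eq (norm first last : String) (need : Bool) (cand : Option String)
    (l : List (String × Int)) :
    pvLoopB norm first last need cand l =
      match pvScanExact norm l with
      | some r => some r
      | none =>
        if need then
          match cand with
          | some c => some c
          | none => pvScanPartial first last l
        else cand := by
  induction l generalizing cand with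
  | nil =>
    simp only [pvLoopB, pvScanExact]
    cases need <;> cases cand <;> simp [pvScanPartial]
  | cons hd tl ih =>
    obtain ⟨db, v⟩ := hd
    simp only [pvLoopB, pvScanExact, pvScanPartial]
    by_cases hx : pvNorm db == norm
    · simp [hx]
    · simp only [hx, if_false, Bool.false_eq_true]
      rw [ih]
      cases need <;> cases cand <;>
        by_cases hp : pvPartialHit first last (pvNorm db) <;>
          simp [hp]

-- ===== VERDICT (by name: the statement is the Claim_ definition above) =====
theorem match_fighter_names_spec : Claim_equal_match_fighter_names := by
  intro api_name db_fighters _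
  unfold Spec_match_fighter_names match_fighter_names match_fighter_names_alt
  rw [pvLoopB_eq]
  cases hx : pvScanExact (pvNorm api_name) db_fighters with
  | some r => simp [hx]
  | none =>
    by_cases hlen : 2 ≤ (PySem.Str.split₀ (pvNorm api_name)).length <;> simp [hx, hlen]
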